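-- pv_equiv track=rewrite | github.com/huang-laboratory/EMProt | emprot/utils/secstr.py | segment_secstr
-- ===== SOURCE A (Python) =====
-- def segment_secstr(data):
--     if len(data) == 0:
--         return []
--
--     current_value = data[0]
--     start_index = 0
--     n_frag = 0
--     l = len(data)
--     ret = [0] * l
--     for i in range(1, len(data)):
--         if data[i] != current_value:
--             for k in range(start_index, i):
--                 ret[k] = n_frag
--             current_value = data[i]
--             start_index = i
--             n_frag += 1
--
--     for k in range(start_index, len(data)):
--         ret[k] = n_frag
--     return ret
-- ===== SOURCE B (Python) =====
-- def segment_secstr(data):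
--     if not data:
--         return []
--     ret = [0]
--     n_frag = 0
--     prev = data[0]
--     for cur in data[1:]:
--         if cur != prev:
--             n_frag += 1
--         ret.append(n_frag)
--         prev = cur
--     return ret
-- ===== Notes on version B (the rewrite author's own statement) =====
-- stated objective: simpler
-- what changed: Single forward pass appending the current fragment counter at each position, replacing A's start_index bookkeeping with nested backfill loops over a preallocated array.
import Mathlib
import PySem

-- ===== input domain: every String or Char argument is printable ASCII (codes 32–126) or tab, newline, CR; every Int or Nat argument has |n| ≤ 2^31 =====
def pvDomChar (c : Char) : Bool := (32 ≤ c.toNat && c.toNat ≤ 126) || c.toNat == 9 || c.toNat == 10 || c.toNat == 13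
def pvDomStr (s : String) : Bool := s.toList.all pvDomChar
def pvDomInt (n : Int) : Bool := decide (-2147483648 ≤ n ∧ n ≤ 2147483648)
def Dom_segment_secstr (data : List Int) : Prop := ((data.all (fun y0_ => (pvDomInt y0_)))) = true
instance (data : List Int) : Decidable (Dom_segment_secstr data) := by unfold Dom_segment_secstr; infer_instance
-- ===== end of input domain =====

-- B replaces A's start_index/backfill bookkeeping (nested fill loops over a
-- preallocated array) by one forward pass that appends the fragment counter
-- at each position; objective: simpler.

-- ===== PORT A =====
-- 'ret[k] = n_frag for k in range(a, b)' : indices are nonneg and in range, so .toNat is exact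
def fillA (nf : Int) (ret : List Int) (a b : Int) : List Int :=
  (PySem.List.pyRange a b 1).foldl (fun r k => r.set k.toNat nf) ret

-- loop body of A's 'for i in range(1, len(data))', state (current_value, start_index, n_frag, ret)
def bodyA (data : List Int) (s : Int × Int × Int × List Int) (i : Int) : Int × Int × Int × List Int :=
  if PySem.List.pyGetD data i 0 ≠ s.1 then
    (PySem.List.pyGetD data i 0, i, s.2.2.1 + 1, fillA s.2.2.1 s.2.2.2 s.2.1 i)
  else s

def segment_secstr (data : List Int) : List Int :=
  if data.length = 0 then []
  else
    let s := (PySem.List.pyRange 1 (data.length : Int) 1).foldl (bodyA data)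
      (PySem.List.pyGetD data 0 0, 0, 0, List.replicate data.length 0)
    fillA s.2.2.1 s.2.2.2 s.2.1 (data.length : Int)

-- ===== PORT B =====
-- 'for cur in data[1:]' with accumulator (prev, n_frag), appending n_frag each step
def altGo : Int → Int → List Int → List Int
  | _, _, [] => []
  | prev, n, x :: xs =>
    let n' := if x ≠ prev then n + 1 else n
    n' :: altGo x n' xs

def segment_secstr_alt (data : List Int) : List Int :=
  match data with
  | [] => []
  | x :: xs => 0 :: altGo x 0 xs

-- ===== PRECONDITION & SPEC =====
def Spec_segment_secstr (data : List Int) (out : List Int) : Prop := out = segment_secstr_alt data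
instance (data : List Int) (out : List Int) : Decidable (Spec_segment_secstr data out) := by unfold Spec_segment_secstr; infer_instance

-- ===== CLAIM (what is proved, stated in full; the proofs are below) =====
def Claim_equal_segment_secstr : Prop := ∀ (data : List Int), Dom_segment_secstr data → Spec_segment_secstr data (segment_secstr data)

-- ===== LEMMAS AND PROOFS =====

-- label of position k: number of change points among positions 1..k
def lab (data : List Int) : Nat → Int
  | 0 => 0
  | k+1 => lab data k + (if data.getD (k+1) 0 = data.getD k 0 then 0 else 1)

theorem lab_shift (p x : Int) (t : List Int) :
    ∀ j, lab (p :: x :: t) (j+1) = (if x = p then 0 else 1) + lab (x :: t) j := by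
  intro j
  induction j with
  | zero => simp [lab]
  | succ j ih =>
      show lab (p :: x :: t) (j+1) + _ = _
      rw [ih]
      simp [lab, List.getD]
      ring

theorem altGo_length (prev n : Int) (xs : List Int) : (altGo prev n xs).length = xs.length := by
  induction xs generalizing prev n with
  | nil => rfl
  | cons x xs ih => simp [altGo, ih]

theorem altGo_get : ∀ (xs : List Int) (prev n : Int) (k : Nat), k < xs.length →
    (altGo prev n xs)[k]? = some (n + lab (prev :: xs) (k+1)) := by
  intro xs
  induction xs with
  | nil => intro _ _ k hk; simp at hk
  | cons x t ih =>
      intro prev n k hk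
      cases k with
      | zero =>
          simp [altGo, lab, List.getD]
          by_cases h : x = prev <;> simp [h]
      | succ k =>
          have hk' : k < t.length := by simpa using hk
          simp only [altGo, List.getElem?_cons_succ]
          rw [ih x _ k hk', lab_shift]
          by_cases h : x = prev <;> simp [h] <;> ring_nf

theorem alt_length (data : List Int) : (segment_secstr_alt data).length = data.length := by
  cases data with
  | nil => rfl
  | cons x xs => simp [segment_secstr_alt, altGo_length]

theorem alt_get (data : List Int) (k : Nat) (hk : k < data.length) :
    (segment_secstr_alt data)[k]? = some (lab data k) := by
  cases data with
  | nil => simp at hk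
  | cons x xs =>
      cases k with
      | zero => simp [segment_secstr_alt, lab]
      | succ k =>
          have hk' : k < xs.length := by simpa using hk
          simp only [segment_secstr_alt, List.getElem?_cons_succ]
          rw [altGo_get xs x 0 k hk']
          simp

theorem fillA_length (nf : Int) (a b : Int) : ∀ (ret : List Int),
    (fillA nf ret a b).length = ret.length := by
  unfold fillA
  generalize hn : (b - a).toNat = n
  induction n generalizing a with
  | zero =>
      intro ret
      rw [PySem.List.pyRange_one_eq_nil (by omega)]
      rfl
  | succ n ih =>
      intro ret
      rw [PySem.List.pyRange_one_cons (by omega)]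
      simp only [List.foldl_cons]
      rw [ih (a+1) (by omega)]
      simp

theorem fillA_get (nf : Int) (a b : Int) (ha : 0 ≤ a) : ∀ (ret : List Int) (k : Nat),
    (fillA nf ret a b)[k]? =
      if a ≤ (k : Int) ∧ (k : Int) < b then ret[k]?.map (fun _ => nf) else ret[k]? := by
  unfold fillA
  generalize hn : (b - a).toNat = n
  induction n generalizing a with
  | zero =>
      intro ret k
      rw [PySem.List.pyRange_one_eq_nil (by omega)]
      have : ¬ (a ≤ (k : Int) ∧ (k : Int) < b) := by omega
      simp [this]
  | succ n ih =>
      intro ret k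
      rw [PySem.List.pyRange_one_cons (by omega)]
      simp only [List.foldl_cons]
      rw [ih (a+1) (by omega) (by omega)]
      by_cases hka : (k : Int) = a
      · have hk : k = a.toNat := by omega
        have : ¬ (a + 1 ≤ (k : Int)) := by omega
        simp only [this, false_and, if_false]
        subst hk
        by_cases hlt : a.toNat < ret.length
        · have hb : a < b := by omega
          simp [List.getElem?_set, hlt, hb, ha, le_refl]
        · have h1 : ret[a.toNat]? = none := by
            simp [List.getElem?_eq_none_iff]; omega
          have h2 : (ret.set a.toNat nf)[a.toNat]? = none := by
            simp [List.getElem?_eq_none_iff]; omega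
          simp [h1, h2]
      · have hne : a.toNat ≠ k := by omega
        rw [List.getElem?_set_ne hne]
        by_cases h1 : a + 1 ≤ (k : Int) ∧ (k : Int) < b
        · have h2 : a ≤ (k : Int) ∧ (k : Int) < b := ⟨by omega, h1.2⟩
          simp [h1, h2]
        · by_cases h2 : a ≤ (k : Int) ∧ (k : Int) < b
          · exact absurd ⟨by omega, h2.2⟩ h1
          · rw [if_neg h1, if_neg h2]

-- invariant of A's main loop after processing indices 1..m; state s = (current_value, start_index, n_frag, ret)
def InvA (data : List Int) (m : Nat) (s : Int × Int × Int × List Int) : Prop :=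
  0 ≤ s.2.1 ∧ s.2.1 ≤ (m : Int) ∧
  s.2.2.2.length = data.length ∧
  (∀ k : Nat, (k : Int) < s.2.1 → s.2.2.2[k]? = some (lab data k)) ∧
  (∀ k : Nat, s.2.1 ≤ (k : Int) → k ≤ m → lab data k = s.2.2.1 ∧ data.getD k 0 = s.1)

theorem invA_fold (data : List Int) (hne : data ≠ []) :
    ∀ (m : Nat), m < data.length →
    InvA data m ((PySem.List.pyRange 1 ((m : Int) + 1) 1).foldl (bodyA data)
      (PySem.List.pyGetD data 0 0, 0, 0, List.replicate data.length 0)) := by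
  intro m
  induction m with
  | zero =>
      intro hm
      rw [PySem.List.pyRange_one_eq_nil (by omega)]
      unfold InvA
      refine ⟨by simp, by simp, by simp, by intro k hk; simp at hk; omega, ?_⟩
      intro k hk1 hk2
      have : k = 0 := by omega
      subst this
      refine ⟨rfl, ?_⟩
      cases data with
      | nil => exact absurd rfl hne
      | cons x xs => simp [List.getD, PySem.List.pyGetD_zero_cons]
  | succ m ih =>
      intro hm
      have hm' : m < data.length := by omega
      have ih' := ih hm'
      clear ih
      have hsplit : PySem.List.pyRange 1 ((m : Int) + 1 + 1) 1
          = PySem.List.pyRange 1 ((m : Int) + 1) 1 ++ [((m : Int) + 1)] :=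
        PySem.List.pyRange_one_succ_right (by omega)
      push_cast
      rw [hsplit, List.foldl_append]
      set s := (PySem.List.pyRange 1 ((m : Int) + 1) 1).foldl (bodyA data)
        (PySem.List.pyGetD data 0 0, 0, 0, List.replicate data.length 0) with hs
      simp only [List.foldl_cons, List.foldl_nil]
      unfold InvA
      unfold InvA at ih'
      obtain ⟨h0, h1, h2, h3, h4⟩ := ih'
      have hget : PySem.List.pyGetD data ((m : Int) + 1) 0 = data.getD (m+1) 0 := by
        have : ((m : Int) + 1) = ((m + 1 : Nat) : Int) := by push_cast; ring
        rw [this, PySem.List.pyGetD_natCast]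
      have hdm : data.getD m 0 = s.1 := (h4 m h1 (le_refl m)).2
      have hlabm : lab data m = s.2.2.1 := (h4 m h1 (le_refl m)).1
      unfold bodyA
      by_cases hc : PySem.List.pyGetD data ((m : Int) + 1) 0 ≠ s.1
      · rw [if_pos hc]
        dsimp only
        have hchg : ¬ (data.getD (m+1) 0 = data.getD m 0) := by
          rw [hget] at hc; rw [hdm]; exact hc
        refine ⟨by omega, by omega, ?_, ?_, ?_⟩
        · simpa [fillA_length] using h2
        · intro k hk
          have hk' : (k : Int) < (m : Int) + 1 := by simpa using hk
          rw [fillA_get _ _ _ h0]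
          by_cases hks : s.2.1 ≤ (k : Int)
          · have hkm : k ≤ m := by omega
            have := (h4 k hks hkm).1
            have hklen : k < data.length := by omega
            have hretk : s.2.2.2[k]? = some (lab data k) ∨ k < s.2.2.2.length := by
              right; omega
            have hkl : k < s.2.2.2.length := by omega
            have : s.2.2.2[k]?.map (fun _ => s.2.2.1) = some (lab data k) := by
              rw [List.getElem?_eq_getElem hkl]
              simp [(h4 k hks hkm).1]
            simp [hks, hk', this]
          · have hcond : ¬ (s.2.1 ≤ (k : Int) ∧ (k : Int) < (m : Int) + 1) := by
              intro h; exact hks h.1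
            rw [if_neg hcond]
            exact h3 k (by omega)
        · intro k hk1 hk2
          have hk : k = m + 1 := by omega
          subst hk
          constructor
          · show lab data (m+1) = s.2.2.1 + 1
            simp only [lab]
            rw [if_neg hchg, hlabm]
          · simpa using hget.symm
      · rw [if_neg hc]
        push_neg at hc
        rw [hget] at hc
        refine ⟨h0, by omega, h2, h3, ?_⟩
        intro k hk1 hk2
        rcases Nat.lt_or_ge k (m+1) with hlt | hge
        · exact h4 k hk1 (by omega)
        · have hk : k = m + 1 := by omega
          subst hk
          have heq : data.getD (m+1) 0 = data.getD m 0 := by rw [hc, hdm]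
          refine ⟨?_, by rw [hc]⟩
          show lab data (m+1) = s.2.2.1
          simp only [lab]
          rw [if_pos heq, hlabm]
          ring

-- ===== VERDICT (by name: the statement is the Claim_ definition above) =====
theorem segment_secstr_spec : Claim_equal_segment_secstr := by
  intro data _
  unfold Spec_segment_secstr
  cases hd : data with
  | nil => rfl
  | cons x xs =>
      have hne : x :: xs ≠ ([] : List Int) := by simp
      have hinv := invA_fold (x :: xs) hne xs.length (by simp)
      unfold InvA at hinv
      obtain ⟨h0, h1, h2, h3, h4⟩ := hinv
      unfold segment_secstr
      rw [if_neg (by simp)]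
      have hcast : ((x :: xs).length : Int) = (xs.length : Int) + 1 := by
        push_cast [List.length_cons]; ring
      rw [hcast]
      set s := (PySem.List.pyRange 1 ((xs.length : Int) + 1) 1).foldl (bodyA (x :: xs))
        (PySem.List.pyGetD (x :: xs) 0 0, 0, 0, List.replicate (x :: xs).length 0) with hs
      apply List.ext_getElem?
      intro k
      rw [fillA_get _ _ _ h0]
      by_cases hk : k < (x :: xs).length
      · rw [alt_get (x :: xs) k hk]
        by_cases hks : s.2.1 ≤ (k : Int)
        · have hcond : s.2.1 ≤ (k : Int) ∧ (k : Int) < (xs.length : Int) + 1 := by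
            constructor
            · exact hks
            · simp at hk; omega
          rw [if_pos hcond]
          have hkl : k < s.2.2.2.length := by rw [h2]; exact hk
          rw [List.getElem?_eq_getElem hkl]
          have hlab := (h4 k hks (by simp at hk; omega)).1
          simp [hlab]
        · push_neg at hks
          have hcond : ¬ (s.2.1 ≤ (k : Int) ∧ (k : Int) < (xs.length : Int) + 1) := by
            intro h; exact absurd h.1 (not_le.mpr hks)
          rw [if_neg hcond]
          exact h3 k hks
      · have h5 : s.2.2.2[k]? = none := by
          rw [List.getElem?_eq_none_iff, h2]; omega
        have h6 : (segment_secstr_alt (x :: xs))[k]? = none := by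
          rw [List.getElem?_eq_none_iff, alt_length]; omega
        rw [h6]
        by_cases hcond : s.2.1 ≤ (k : Int) ∧ (k : Int) < (xs.length : Int) + 1
        · rw [if_pos hcond, h5]; rfl
        · rw [if_neg hcond, h5]
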